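-- pv_equiv track=rewrite | github.com/David-Huebner/Hanzi-Network-Quiz | modifications_loop.py | clean_obsoletes
-- ===== SOURCE A (Python) =====
-- def clean_obsoletes(database):
--     modified = []
--
--     for key, entry in database.items():
--         groups = entry.get("components", [])
--         new_groups = []
--
--         # Convert each group to a set for easy subset checking
--         group_sets = [set(group) for group in groups]
--
--         for i, g in enumerate(group_sets):
--             # Check if there exists another group that strictly contains g
--             redundant = any(g < other for j, other in enumerate(group_sets) if i != j)
--             if not redundant:
--                 new_groups.append(groups[i])
--
--         if len(new_groups) != len(groups):
--             entry["components"] = new_groups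
--             modified.append(key)
--
--     return modified
-- ===== SOURCE B (Python) =====
-- def clean_obsoletes(database):
--     modified = []
--
--     for key, entry in database.items():
--         groups = entry.get("components", [])
--         sets = [set(g) for g in groups]
--
--         # Size-descending maximal-antichain pass: a group is redundant iff it is
--         # a strict subset of some already-kept maximal set.
--         order = sorted(range(len(sets)), key=lambda i: len(sets[i]), reverse=True)
--         keep = [True] * len(sets)
--         maximal = []
--         for i in order:
--             s = sets[i]
--             if any(s < m for m in maximal):
--                 keep[i] = False
--             else:
--                 maximal.append(s)
--
--         new_groups = [g for i, g in enumerate(groups) if keep[i]]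
--
--         if len(new_groups) != len(groups):
--             entry["components"] = new_groups
--             modified.append(key)
--
--     return modified
-- ===== Notes on version B (the rewrite author's own statement) =====
-- stated objective: alternative
-- what changed: Replaces the symmetric all-pairs strict-subset scan per entry with a size-descending pass that maintains the list of kept maximal sets and tests each group only against those, rebuilding new_groups by filtering the original groups by the computed keep flags.
import Mathlib
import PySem

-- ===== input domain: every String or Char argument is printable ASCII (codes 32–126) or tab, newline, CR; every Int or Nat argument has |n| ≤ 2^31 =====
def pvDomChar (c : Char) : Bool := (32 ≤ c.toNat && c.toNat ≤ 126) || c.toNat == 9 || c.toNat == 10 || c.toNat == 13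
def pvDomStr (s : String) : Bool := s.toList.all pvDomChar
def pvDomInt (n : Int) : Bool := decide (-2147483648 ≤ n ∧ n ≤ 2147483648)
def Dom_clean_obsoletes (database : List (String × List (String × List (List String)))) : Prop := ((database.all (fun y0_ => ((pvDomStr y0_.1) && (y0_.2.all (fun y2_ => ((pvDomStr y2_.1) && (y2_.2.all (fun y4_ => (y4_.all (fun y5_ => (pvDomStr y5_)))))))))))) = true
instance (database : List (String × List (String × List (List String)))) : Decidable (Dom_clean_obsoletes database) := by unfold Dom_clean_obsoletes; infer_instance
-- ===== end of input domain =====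

-- B replaces A's symmetric all-pairs strict-subset scan by a size-descending maximal-antichain
-- pass (alternative decomposition, same return value). Both Pythons also mutate
-- entry["components"] in place for modified keys (A and B perform the identical mutation);
-- the equivalence proved here is about the RETURN value.

-- ===== PORT A =====
-- Python's 's < t' on sets (strict subset); both Pythons use this operator
def pySsub (a b : PySem.Set String) : Bool :=
  PySem.Set.issubset a b && !(PySem.Set.equal a b)

-- entry.get("components", []) on the association-list dict (first match)
def pyEntryGet (entry : List (String × List (List String))) : List (List String) :=
  match entry with
  | [] => []
  | (k, v) :: rest => if k == "components" then v else pyEntryGet rest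

def clean_obsoletes (database : List (String × List (String × List (List String)))) : List String :=
  database.foldl (fun modified kv =>
    let groups := pyEntryGet kv.2
    let group_sets := groups.map (fun group => PySem.Set.ofList group)
    let new_groups := (PySem.List.enumerate group_sets).foldl (fun ng ig =>
      let redundant := (PySem.List.enumerate group_sets).any (fun jo =>
        decide (ig.1 ≠ jo.1) && pySsub ig.2 jo.2)
      if !redundant then ng ++ [PySem.List.pyGetD groups ig.1 []] else ng) []
    if new_groups.length ≠ groups.length then modified ++ [kv.1] else modified) []

-- ===== PORT B =====
def clean_obsoletes_alt (database : List (String × List (String × List (List String)))) : List String :=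
  database.foldl (fun modified kv =>
    let groups := pyEntryGet kv.2
    let sets := groups.map (fun g => PySem.Set.ofList g)
    let order := PySem.List.sorted (PySem.List.pyRange 0 (sets.length : Int) 1)
      (fun i => PySem.Set.len (PySem.List.pyGetD sets i [])) true
    let st := order.foldl (fun (st : List Bool × List (PySem.Set String)) i =>
      let s := PySem.List.pyGetD sets i []
      if st.2.any (fun m => pySsub s m) then (PySem.List.pySetD st.1 i false, st.2)
      else (st.1, st.2 ++ [s])) (List.replicate sets.length true, [])
    let new_groups := ((PySem.List.enumerate groups).filter (fun ig =>
      PySem.List.pyGetD st.1 ig.1 true)).map (fun ig => ig.2)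
    if new_groups.length ≠ groups.length then modified ++ [kv.1] else modified) []

-- ===== PRECONDITION & SPEC =====
def Spec_clean_obsoletes (database : List (String × List (String × List (List String)))) (out : List String) : Prop := out = clean_obsoletes_alt database
instance (database : List (String × List (String × List (List String)))) (out : List String) : Decidable (Spec_clean_obsoletes database out) := by unfold Spec_clean_obsoletes; infer_instance

-- ===== CLAIM (what is proved, stated in full; the proofs are below) =====
def Claim_equal_clean_obsoletes : Prop := ∀ (database : List (String × List (String × List (List String)))), Dom_clean_obsoletes database → Spec_clean_obsoletes database (clean_obsoletes database)

-- ===== LEMMAS AND PROOFS =====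

-- "s is redundant among sets": some set in the list strictly contains it
def redB (sets : List (PySem.Set String)) (s : PySem.Set String) : Bool :=
  sets.any (fun t => pySsub s t)

-- B's loop body, named for the proofs (definitionally the lambda in the port of B)
def stepF (sets : List (PySem.Set String)) :
    (List Bool × List (PySem.Set String)) → Int → (List Bool × List (PySem.Set String)) :=
  fun st i =>
    let s := PySem.List.pyGetD sets i []
    if st.2.any (fun m => pySsub s m) then (PySem.List.pySetD st.1 i false, st.2)
    else (st.1, st.2 ++ [s])

def maxLen (sets : List (PySem.Set String)) : Nat :=
  sets.foldr (fun s m => max s.length m) 0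

theorem pySsub_self (s : PySem.Set String) : pySsub s s = false := by
  have h : PySem.Set.equal s s = true := (PySem.Set.equal_iff s s).mpr (fun x => Iff.rfl)
  simp [pySsub, h]

theorem pySsub_length {a b : PySem.Set String} (ha : a.Nodup) (h : pySsub a b = true) :
    a.length < b.length := by
  unfold pySsub at h
  rw [Bool.and_eq_true, Bool.not_eq_eq_eq_not, Bool.not_true] at h
  obtain ⟨hsub, hne⟩ := h
  have hsub' : ∀ x ∈ a, x ∈ b := (PySem.Set.issubset_iff a b).mp hsub
  have hba : ¬ (PySem.Set.issubset b a = true) := by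
    intro hc
    rw [show PySem.Set.equal a b = (PySem.Set.issubset a b && PySem.Set.issubset b a) from rfl,
      hsub, hc] at hne
    simp at hne
  rw [PySem.Set.issubset_iff] at hba
  push Not at hba
  obtain ⟨x, hxb, hxa⟩ := hba
  have hsube : a ⊆ b.erase x := by
    intro y hy
    exact (List.mem_erase_of_ne (by rintro rfl; exact hxa hy)).mpr (hsub' y hy)
  have h1 : a.length ≤ (b.erase x).length := (ha.subperm hsube).length_le
  have h2 : (b.erase x).length = b.length - 1 := List.length_erase_of_mem hxb
  have h3 : 1 ≤ b.length := List.length_pos_of_mem hxb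
  omega

theorem pySsub_trans {a b c : PySem.Set String} (ha : a.Nodup) (hb : b.Nodup)
    (hab : pySsub a b = true) (hbc : pySsub b c = true) : pySsub a c = true := by
  have hab' := pySsub_length ha hab
  unfold pySsub at *
  rw [Bool.and_eq_true, Bool.not_eq_eq_eq_not, Bool.not_true] at hab hbc
  rw [Bool.and_eq_true, Bool.not_eq_eq_eq_not, Bool.not_true]
  obtain ⟨h1, _⟩ := hab
  obtain ⟨h2, _⟩ := hbc
  rw [PySem.Set.issubset_iff] at h1 h2
  constructor
  · exact (PySem.Set.issubset_iff a c).mpr (fun x hx => h2 x (h1 x hx))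
  · rw [← Bool.not_eq_true, PySem.Set.equal_iff]
    intro hc
    have hbsub : b ⊆ a := fun x hx => (hc x).mpr (h2 x hx)
    have := (hb.subperm hbsub).length_le
    omega

theorem le_maxLen {sets : List (PySem.Set String)} {t : PySem.Set String} (h : t ∈ sets) :
    t.length ≤ maxLen sets := by
  induction sets with
  | nil => cases h
  | cons x xs ih =>
    rcases List.mem_cons.mp h with rfl | h'
    · exact le_max_left _ _
    · exact le_trans (ih h') (le_max_right _ _)

theorem exists_maximal (sets : List (PySem.Set String)) (hnd : ∀ s ∈ sets, s.Nodup) :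
    ∀ (d : Nat) (s : PySem.Set String), s.Nodup → maxLen sets - s.length ≤ d →
      redB sets s = true →
      ∃ t ∈ sets, pySsub s t = true ∧ redB sets t = false := by
  intro d
  induction d with
  | zero =>
    intro s hs hle hred
    rw [redB, List.any_eq_true] at hred
    obtain ⟨t, ht, hst⟩ := hred
    have h1 : s.length < t.length := pySsub_length hs hst
    have h2 : t.length ≤ maxLen sets := le_maxLen ht
    omega
  | succ d ih =>
    intro s hs hle hred
    rw [redB, List.any_eq_true] at hred
    obtain ⟨t, ht, hst⟩ := hred
    by_cases hrt : redB sets t = true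
    · have h1 : s.length < t.length := pySsub_length hs hst
      have h2 : t.length ≤ maxLen sets := le_maxLen ht
      obtain ⟨u, hu, htu, hru⟩ := ih t (hnd t ht) (by omega) hrt
      exact ⟨u, hu, pySsub_trans hs (hnd t ht) hst htu, hru⟩
    · exact ⟨t, ht, hst, by simpa using hrt⟩

-- A's inner any over enumerate (with the i ≠ j guard) IS the redundancy predicate
theorem anyA_eq_redB (sets : List (PySem.Set String)) (k : Nat) (hk : k < sets.length) :
    ((PySem.List.enumerate sets).any (fun jo =>
        decide ((k : Int) ≠ jo.1) && pySsub sets[k] jo.2))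
      = redB sets sets[k] := by
  rw [redB]
  rcases hA : (PySem.List.enumerate sets).any (fun jo =>
      decide ((k : Int) ≠ jo.1) && pySsub sets[k] jo.2) with _ | _
  · symm
    rw [← Bool.not_eq_true, List.any_eq_true] at hA ⊢
    intro ⟨t, ht, hst⟩
    apply hA
    obtain ⟨j, hj, rfl⟩ := List.mem_iff_getElem.mp ht
    refine ⟨((j : Int), sets[j]),
      (PySem.List.mem_enumerate_iff sets 0 _).mpr ⟨j, hj, by ring_nf⟩, ?_⟩
    simp only [Bool.and_eq_true, decide_eq_true_iff]
    refine ⟨?_, hst⟩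
    intro hc
    have : k = j := by exact_mod_cast hc
    subst this
    rw [pySsub_self] at hst
    exact Bool.false_ne_true hst
  · symm
    rw [List.any_eq_true] at hA ⊢
    obtain ⟨jo, hjo, hcond⟩ := hA
    obtain ⟨j, hj, rfl⟩ := (PySem.List.mem_enumerate_iff sets 0 _).mp hjo
    simp only [Bool.and_eq_true, decide_eq_true_iff] at hcond
    exact ⟨sets[j], List.getElem_mem hj, hcond.2⟩

-- invariant of B's size-descending pass: after processing all of L, a processed index keeps
-- its flag iff its set is not strictly contained in any other set of the list
theorem inv_fold (sets : List (PySem.Set String)) (hnd : ∀ s ∈ sets, s.Nodup) :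
    ∀ (L : List Int) (keep : List Bool) (M : List (PySem.Set String)),
      keep.length = sets.length →
      L.Nodup →
      L.Pairwise (fun a b =>
        PySem.Set.len (PySem.List.pyGetD sets b []) ≤ PySem.Set.len (PySem.List.pyGetD sets a [])) →
      (∀ i ∈ L, 0 ≤ i ∧ i < (sets.length : Int)) →
      (∀ m ∈ M, m ∈ sets ∧ redB sets m = false) →
      (∀ s ∈ sets, redB sets s = false → s ∈ M ∨ ∃ i ∈ L, PySem.List.pyGetD sets i [] = s) →
      (∀ (k : Nat) (hk : k < sets.length),
        PySem.List.pyGetD keep (k : Int) true = (decide ((k : Int) ∈ L) || !redB sets sets[k])) →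
      ∀ (k : Nat) (hk : k < sets.length),
        PySem.List.pyGetD (L.foldl (stepF sets) (keep, M)).1 (k : Int) true = !redB sets sets[k] := by
  intro L
  induction L with
  | nil =>
    intro keep M _ _ _ _ _ _ hK k hk
    simpa using hK k hk
  | cons i L' ih =>
    intro keep M hlen hnodup hpair hbnd hM hMax hK k hk
    obtain ⟨hnotmem, hnodup'⟩ := List.nodup_cons.mp hnodup
    obtain ⟨hi0, hin⟩ := hbnd i (List.mem_cons_self)
    have hitn : i.toNat < sets.length := by omega
    have hgelem : PySem.List.pyGetD sets i [] = sets[i.toNat] :=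
      PySem.List.pyGetD_eq_getElem sets [] hi0 hin
    have hgmem : PySem.List.pyGetD sets i [] ∈ sets := by
      rw [hgelem]; exact List.getElem_mem hitn
    have hitoNat : ((i.toNat : Nat) : Int) = i := Int.toNat_of_nonneg hi0
    have cond_eq : (M.any fun m => pySsub (PySem.List.pyGetD sets i []) m)
        = redB sets (PySem.List.pyGetD sets i []) := by
      rcases hred : redB sets (PySem.List.pyGetD sets i []) with _ | _
      · rw [← Bool.not_eq_true, List.any_eq_true]
        rintro ⟨m, hmM, hsm⟩
        have hmsets := (hM m hmM).1
        have : redB sets (PySem.List.pyGetD sets i []) = true :=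
          List.any_eq_true.mpr ⟨m, hmsets, hsm⟩
        rw [hred] at this; exact Bool.false_ne_true this
      · obtain ⟨t, htsets, hgt, hrt⟩ := exists_maximal sets hnd (maxLen sets)
          (PySem.List.pyGetD sets i []) (hnd _ hgmem) (by omega) hred
        rcases hMax t htsets hrt with htM | ⟨i', hi', heq⟩
        · exact List.any_eq_true.mpr ⟨t, htM, hgt⟩
        · exfalso
          rcases List.mem_cons.mp hi' with rfl | hi'L
          · rw [heq, pySsub_self] at hgt
            exact Bool.false_ne_true hgt
          · have hle := (List.pairwise_cons.mp hpair).1 i' hi'L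
            rw [heq] at hle
            have hlt := pySsub_length (hnd _ hgmem) hgt
            simp only [PySem.Set.len] at hle
            omega
    rw [List.foldl_cons]
    have hstep : stepF sets (keep, M) i =
        (if redB sets (PySem.List.pyGetD sets i []) = true
         then (PySem.List.pySetD keep i false, M)
         else (keep, M ++ [PySem.List.pyGetD sets i []])) := by
      simp only [stepF, cond_eq]
    rw [hstep]
    rcases hred : redB sets (PySem.List.pyGetD sets i []) with _ | _
    · -- kept: g not redundant, appended to the maximal list
      rw [if_neg (by simp)]
      apply ih keep (M ++ [PySem.List.pyGetD sets i []]) hlen hnodup'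
        (List.pairwise_cons.mp hpair).2 (fun j hj => hbnd j (List.mem_cons_of_mem _ hj))
      · intro m hm
        rcases List.mem_append.mp hm with hm' | hm'
        · exact hM m hm'
        · rw [List.mem_singleton.mp hm']
          exact ⟨hgmem, hred⟩
      · intro s hs hrs
        rcases hMax s hs hrs with hsM | ⟨i', hi', heq⟩
        · exact Or.inl (List.mem_append_left _ hsM)
        · rcases List.mem_cons.mp hi' with rfl | hi'L
          · exact Or.inl (List.mem_append_right _ (by rw [heq]; exact List.mem_singleton_self _))
          · exact Or.inr ⟨i', hi'L, heq⟩
      · intro k' hk'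
        rw [hK k' hk']
        by_cases hki : (k' : Int) = i
        · have hkn : k' = i.toNat := by omega
          have hsk : sets[k'] = PySem.List.pyGetD sets i [] := by
            subst hkn; exact hgelem.symm
          rw [hsk, hred]
          simp
        · have hiff : ((k' : Int) ∈ i :: L') ↔ ((k' : Int) ∈ L') := by
            simp [List.mem_cons, hki]
          simp only [hiff]
    · -- redundant: keep[i] := false
      rw [if_pos rfl]
      apply ih (PySem.List.pySetD keep i false) M
        (by rw [PySem.List.length_pySetD]; exact hlen) hnodup'
        (List.pairwise_cons.mp hpair).2 (fun j hj => hbnd j (List.mem_cons_of_mem _ hj)) hM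
      · intro s hs hrs
        rcases hMax s hs hrs with hsM | ⟨i', hi', heq⟩
        · exact Or.inl hsM
        · rcases List.mem_cons.mp hi' with rfl | hi'L
          · exfalso; rw [heq, hrs] at hred; exact Bool.false_ne_true hred
          · exact Or.inr ⟨i', hi'L, heq⟩
      · intro k' hk'
        rw [← hitoNat, PySem.List.pyGetD_pySetD_natCast keep i.toNat k' false true (by omega)]
        by_cases hki : k' = i.toNat
        · rw [if_pos hki]
          have hsk : sets[k'] = PySem.List.pyGetD sets i [] := by
            subst hki; exact hgelem.symm
          have hmem : ¬ ((k' : Int) ∈ L') := by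
            intro hc
            rw [show ((k' : Int)) = i by omega] at hc
            exact hnotmem hc
          rw [hsk, hred]
          simp [hmem]
        · rw [if_neg hki, hK k' hk']
          have hiff : ((k' : Int) ∈ i :: L') ↔ ((k' : Int) ∈ L') := by
            simp only [List.mem_cons, or_iff_right_iff_imp]
            intro hc; exfalso; apply hki; omega
          simp only [hiff]

-- the final keep flags of B's pass, instantiating the invariant at the sorted order
theorem keepF_getD (sets : List (PySem.Set String)) (hnd : ∀ s ∈ sets, s.Nodup)
    (k : Nat) (hk : k < sets.length) :
    PySem.List.pyGetD
      ((PySem.List.sorted (PySem.List.pyRange 0 (sets.length : Int) 1)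
          (fun i => PySem.Set.len (PySem.List.pyGetD sets i [])) true).foldl
        (stepF sets) (List.replicate sets.length true, [])).1 (k : Int) true
      = !redB sets sets[k] := by
  set key : Int → Int := fun i => PySem.Set.len (PySem.List.pyGetD sets i []) with hkey
  set order := PySem.List.sorted (PySem.List.pyRange 0 (sets.length : Int) 1) key true with horder
  have hmemo : ∀ j : Nat, j < sets.length → ((j : Int) ∈ order) := by
    intro j hj
    rw [horder, PySem.List.mem_sorted]
    exact PySem.List.mem_pyRange_one.mpr ⟨Int.natCast_nonneg j, by exact_mod_cast hj⟩
  apply inv_fold sets hnd order (List.replicate sets.length true) []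
  · exact List.length_replicate ..
  · exact ((PySem.List.sorted_perm _ _ _).symm.nodup (PySem.List.nodup_pyRange_one _ _))
  · exact PySem.List.sorted_pairwise_rev _ _
  · intro i hi
    rw [horder, PySem.List.mem_sorted] at hi
    exact PySem.List.mem_pyRange_one.mp hi
  · intro m hm; cases hm
  · intro s hs _
    obtain ⟨j, hj, rfl⟩ := List.mem_iff_getElem.mp hs
    exact Or.inr ⟨(j : Int), hmemo j hj, PySem.List.pyGetD_ofNat sets j [] hj⟩
  · intro k' hk'
    rw [PySem.List.pyGetD_ofNat _ k' true (by simpa using hk')]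
    simp [hmemo k' hk']

-- per-entry: A's new_groups equals B's new_groups
theorem new_groups_eq (groups : List (List String)) :
    ((PySem.List.enumerate (groups.map (fun group => PySem.Set.ofList group))).foldl (fun ng ig =>
      if !((PySem.List.enumerate (groups.map (fun group => PySem.Set.ofList group))).any (fun jo =>
        decide (ig.1 ≠ jo.1) && pySsub ig.2 jo.2)) then ng ++ [PySem.List.pyGetD groups ig.1 []] else ng) [])
    = ((PySem.List.enumerate groups).filter (fun ig =>
        PySem.List.pyGetD
          ((PySem.List.sorted (PySem.List.pyRange 0 ((groups.map (fun g => PySem.Set.ofList g)).length : Int) 1)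
              (fun i => PySem.Set.len (PySem.List.pyGetD (groups.map (fun g => PySem.Set.ofList g)) i [])) true).foldl
            (stepF (groups.map (fun g => PySem.Set.ofList g)))
            (List.replicate (groups.map (fun g => PySem.Set.ofList g)).length true, [])).1 ig.1 true)).map
        (fun ig => ig.2) := by
  have hnd : ∀ s ∈ (groups.map (fun g => PySem.Set.ofList g)), s.Nodup := by
    intro s hs
    obtain ⟨g, _, rfl⟩ := List.mem_map.mp hs
    exact PySem.Set.nodup_ofList g
  rw [PySem.List.foldl_append_if]
  rw [PySem.List.enumerate_eq_map_pyRange (groups.map (fun group => PySem.Set.ofList group)) [],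
      PySem.List.enumerate_eq_map_pyRange groups ([] : List String)]
  rw [List.filter_map, List.filter_map, List.map_map, List.map_map, List.nil_append]
  simp only [PySem.List.len_eq]
  have hl : (groups.map (fun g => PySem.Set.ofList g)).length = groups.length :=
    List.length_map ..
  rw [← hl]
  have hsetsenum : (List.map (fun j => (j, PySem.List.pyGetD (groups.map (fun group => PySem.Set.ofList group)) j []))
      (PySem.List.pyRange 0 (((groups.map (fun group => PySem.Set.ofList group)).length : Nat) : Int) 1))
      = PySem.List.enumerate (groups.map (fun group => PySem.Set.ofList group)) := by
    rw [PySem.List.enumerate_eq_map_pyRange (groups.map (fun group => PySem.Set.ofList group)) []]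
    simp only [PySem.List.len_eq]
  congr 1
  apply List.filter_congr
  intro j hj
  obtain ⟨h0, hlt⟩ := PySem.List.mem_pyRange_one.mp hj
  dsimp only [Function.comp_apply]
  have hk : j.toNat < (groups.map (fun g => PySem.Set.ofList g)).length := by omega
  have hjk : ((j.toNat : Nat) : Int) = j := Int.toNat_of_nonneg h0
  rw [hsetsenum, ← hjk,
    PySem.List.pyGetD_ofNat (groups.map (fun group => PySem.Set.ofList group)) j.toNat [] hk,
    anyA_eq_redB _ j.toNat hk, keepF_getD _ hnd j.toNat hk]

-- ===== VERDICT (by name: the statement is the Claim_ definition above) =====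
theorem clean_obsoletes_spec : Claim_equal_clean_obsoletes := by
  intro database _
  unfold Spec_clean_obsoletes clean_obsoletes clean_obsoletes_alt
  congr 1
  funext modified kv
  dsimp only
  rw [show (fun (st : List Bool × List (PySem.Set String)) (i : Int) =>
      let s := PySem.List.pyGetD ((pyEntryGet kv.2).map (fun g => PySem.Set.ofList g)) i []
      if st.2.any (fun m => pySsub s m)
      then (PySem.List.pySetD st.1 i false, st.2)
      else (st.1, st.2 ++ [s]))
    = stepF ((pyEntryGet kv.2).map (fun g => PySem.Set.ofList g)) from rfl]
  rw [new_groups_eq (pyEntryGet kv.2)]
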